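-- pv_equiv track=rewrite | github.com/BrianCoveney/2018_SOFT8033_SDH4_A02_BrianCoveney | Hint1/A02 - Hint1.py | aggregate_info
-- ===== SOURCE A (Python) =====
-- def aggregate_info(x):
--     cuisine, reviews = x[0], x[1]
--     total_reviews, total_neg_reviews, total_points = 0, 0, 0
--
--     for r in reviews:
--         review_tuple = r[1]
--         evaluation, points = review_tuple[1], review_tuple[0]
--
--         if evaluation == "Negative":
--             total_neg_reviews += 1
--             total_points -= points
--         else:
--             total_points += points
--
--         total_reviews += 1
--
--     return cuisine, (total_reviews, total_neg_reviews, total_points)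
-- ===== SOURCE B (Python) =====
-- def _merge(a, b):
--     return (a[0] + b[0], a[1] + b[1], a[2] + b[2])
--
--
-- def _agg(reviews):
--     n = len(reviews)
--     if n == 0:
--         return (0, 0, 0)
--     if n == 1:
--         points, evaluation = reviews[0][1][0], reviews[0][1][1]
--         if evaluation == "Negative":
--             return (1, 1, -points)
--         return (1, 0, points)
--     mid = n // 2
--     return _merge(_agg(reviews[:mid]), _agg(reviews[mid:]))
--
--
-- def aggregate_info(x):
--     return x[0], _agg(x[1])
-- ===== Notes on version B (the rewrite author's own statement) =====
-- stated objective: alternative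
-- what changed: Replaces A's left-to-right accumulator loop with a divide-and-conquer recursion: the review list is split in halves, each half aggregated recursively, and the (count, negatives, points) triples merged component-wise with a monoid combine.
import Mathlib
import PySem

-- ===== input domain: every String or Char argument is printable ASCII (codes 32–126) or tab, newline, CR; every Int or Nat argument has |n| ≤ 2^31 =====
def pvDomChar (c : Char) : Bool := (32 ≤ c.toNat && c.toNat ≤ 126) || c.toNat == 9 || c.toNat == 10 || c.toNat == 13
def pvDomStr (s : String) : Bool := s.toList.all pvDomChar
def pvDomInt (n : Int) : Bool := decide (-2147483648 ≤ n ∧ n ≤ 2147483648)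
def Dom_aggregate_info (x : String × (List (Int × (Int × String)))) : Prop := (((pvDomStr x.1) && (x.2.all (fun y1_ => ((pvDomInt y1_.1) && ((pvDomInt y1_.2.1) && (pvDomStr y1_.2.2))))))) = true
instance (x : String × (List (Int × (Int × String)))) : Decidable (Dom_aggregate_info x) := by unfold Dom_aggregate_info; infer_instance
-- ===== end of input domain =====

-- B replaces A's left-to-right accumulator loop by a divide-and-conquer recursion merging (count, negatives, points) triples component-wise; same results, different traversal (objective: alternative).

-- ===== PORT A =====
-- literal port of A's single loop threading (total_reviews, total_neg_reviews, total_points)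
def aggregate_info (x : String × (List (Int × (Int × String)))) : String × (Int × Int × Int) :=
  let cuisine := x.1
  let reviews := x.2
  let st := reviews.foldl (fun (acc : Int × Int × Int) r =>
    let review_tuple := r.2
    let evaluation := review_tuple.2
    let points := review_tuple.1
    if evaluation == "Negative" then
      (acc.1 + 1, acc.2.1 + 1, acc.2.2 - points)
    else
      (acc.1 + 1, acc.2.1, acc.2.2 + points)) (0, 0, 0)
  (cuisine, st)

-- ===== PORT B =====
-- component-wise merge of two aggregate triples (Source B's _merge)
def pvMerge (a b : Int × Int × Int) : Int × Int × Int :=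
  (a.1 + b.1, a.2.1 + b.2.1, a.2.2 + b.2.2)

-- Source B's _agg: divide and conquer over the list; the slices reviews[:mid] / reviews[mid:]
-- with 0 ≤ mid ≤ len are exactly List.take / List.drop
def pvAgg : List (Int × (Int × String)) → Int × Int × Int
  | [] => (0, 0, 0)
  | [r] => if r.2.2 == "Negative" then (1, 1, -r.2.1) else (1, 0, r.2.1)
  | r1 :: r2 :: rest =>
    let rs := r1 :: r2 :: rest
    let mid := rs.length / 2
    pvMerge (pvAgg (rs.take mid)) (pvAgg (rs.drop mid))
termination_by rs => rs.length
decreasing_by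
  · simp only [List.length_take, List.length_cons]; omega
  · simp only [List.length_drop, List.length_cons]; omega

def aggregate_info_alt (x : String × (List (Int × (Int × String)))) : String × (Int × Int × Int) :=
  (x.1, pvAgg x.2)

-- ===== PRECONDITION & SPEC =====
def Spec_aggregate_info (x : String × (List (Int × (Int × String)))) (out : String × (Int × Int × Int)) : Prop := out = aggregate_info_alt x
instance (x : String × (List (Int × (Int × String)))) (out : String × (Int × Int × Int)) : Decidable (Spec_aggregate_info x out) := by unfold Spec_aggregate_info; infer_instance

-- ===== CLAIM (what is proved, stated in full; the proofs are below) =====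
def Claim_equal_aggregate_info : Prop := ∀ (x : String × (List (Int × (Int × String)))), Dom_aggregate_info x → Spec_aggregate_info x (aggregate_info x)

-- ===== LEMMAS AND PROOFS =====

-- canonical value of the three aggregates, additive over append
def pvNegs (rs : List (Int × (Int × String))) : Int :=
  (rs.map (fun r => if r.2.2 == "Negative" then (1 : Int) else 0)).sum

def pvPts (rs : List (Int × (Int × String))) : Int :=
  (rs.map (fun r => if r.2.2 == "Negative" then -r.2.1 else r.2.1)).sum

-- B's divide-and-conquer computes the canonical aggregates
theorem pvAgg_eq (rs : List (Int × (Int × String))) :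
    pvAgg rs = ((rs.length : Int), pvNegs rs, pvPts rs) := by
  induction rs using pvAgg.induct with
  | case1 => simp [pvAgg, pvNegs, pvPts]
  | case2 r h => simp only [beq_iff_eq] at h; simp [pvAgg, pvNegs, pvPts, h]
  | case3 r h => simp only [beq_iff_eq] at h; simp [pvAgg, pvNegs, pvPts, h]
  | case4 r1 r2 rest rs mid ih1 ih2 =>
    rw [pvAgg]
    rw [ih1, ih2, pvMerge]
    have hsplit : rs.take mid ++ rs.drop mid = r1 :: r2 :: rest := List.take_append_drop _ _
    conv_rhs => rw [← hsplit]
    simp only [List.length_append, pvNegs, pvPts, List.map_append, List.sum_append]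
    push_cast
    ring_nf

-- loop invariant: A's fold from any start state equals start plus the canonical aggregates
theorem pv_fold_inv (reviews : List (Int × (Int × String))) (a b c : Int) :
    reviews.foldl (fun (acc : Int × Int × Int) r =>
      if r.2.2 == "Negative" then
        (acc.1 + 1, acc.2.1 + 1, acc.2.2 - r.2.1)
      else
        (acc.1 + 1, acc.2.1, acc.2.2 + r.2.1)) (a, b, c)
    = (a + reviews.length, b + pvNegs reviews, c + pvPts reviews) := by
  induction reviews generalizing a b c with
  | nil => simp [pvNegs, pvPts]
  | cons h t ih =>
    simp only [List.foldl_cons, pvNegs, pvPts, List.length_cons, List.map_cons, List.sum_cons]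
    by_cases hneg : h.2.2 == "Negative"
    all_goals simp only [hneg, if_true, if_false, Bool.false_eq_true]
    all_goals rw [ih]
    all_goals unfold pvNegs pvPts
    all_goals refine Prod.ext ?_ (Prod.ext ?_ ?_) <;> simp <;> push_cast <;> ring

-- ===== VERDICT (by name: the statement is the Claim_ definition above) =====
theorem aggregate_info_spec : Claim_equal_aggregate_info := by
  intro x _
  unfold Spec_aggregate_info aggregate_info aggregate_info_alt
  simp only []
  rw [pv_fold_inv, pvAgg_eq]
  simp
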